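-- pv_equiv track=rewrite | github.com/mdornseif/ARCive | tools/tools.py | build_ngramms
-- ===== SOURCE A (Python) =====
-- def build_ngramms(l, n=3):
--     ret = []
--     for terms in l:
--         terms = terms.split()
--         while len(terms) >= n:
--             ret.append(terms[:n])
--             terms = terms[1:]
--     return ret
-- ===== SOURCE B (Python) =====
-- def build_ngramms(l, n=3):
--     ret = []
--     for terms in l:
--         words = terms.split()
--         if len(words) >= n:
--             ret.extend(list(t) for t in zip(*(words[i:] for i in range(n))))
--     return ret
-- ===== Notes on version B (the rewrite author's own statement) =====
-- stated objective: idiomatic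
-- what changed: Replaces the sliding-window while loop with repeated slicing by a zip/transpose of n offset lists per string.
-- outside the precondition, e.g. on build_ngramms(['a b'], 0): A does not finish within the time limit, B returns []
import Mathlib
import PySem

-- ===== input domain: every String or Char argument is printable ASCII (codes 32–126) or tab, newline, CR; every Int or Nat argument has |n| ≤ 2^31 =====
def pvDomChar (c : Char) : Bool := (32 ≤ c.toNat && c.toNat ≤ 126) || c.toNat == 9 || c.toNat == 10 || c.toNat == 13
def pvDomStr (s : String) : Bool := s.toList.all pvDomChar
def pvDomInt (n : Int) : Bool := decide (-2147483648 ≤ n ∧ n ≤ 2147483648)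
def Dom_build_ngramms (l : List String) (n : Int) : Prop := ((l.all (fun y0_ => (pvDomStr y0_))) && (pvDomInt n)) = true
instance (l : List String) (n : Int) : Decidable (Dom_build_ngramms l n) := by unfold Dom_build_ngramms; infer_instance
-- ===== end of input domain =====

-- B replaces A's sliding-window while loop by a zip/transpose of n offset lists (idiomatic; same cost).

-- ===== PORT A =====
-- the 'while len(terms) >= n: ret.append(terms[:n]); terms = terms[1:]' loop
def pvLoopA (ret : List (List String)) (terms : List String) (n : Int) : List (List String) :=
  if _h : n ≤ (terms.length : Int) then
    match terms with
    | [] => ret   -- Python loops forever here (reachable only when n ≤ 0, excluded by Pre_)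
    | _ :: rest => pvLoopA (ret ++ [PySem.List.slice terms none (some n)]) rest n
  else ret
termination_by terms.length
decreasing_by simp_all

def build_ngramms (l : List String) (n : Int) : List (List String) :=
  l.foldl (fun ret terms => pvLoopA ret (PySem.Str.split₀ terms) n) []

-- ===== PORT B =====
-- zip(*iterables): while every list is nonempty, emit the heads and move to the tails
def pvZipStar (ls : List (List String)) : List (List String) :=
  match ls with
  | [] => []
  | a :: rest =>
    if _h : (a :: rest).all (fun w => !w.isEmpty) then
      ((a :: rest).map (fun w => w.headD "")) :: pvZipStar ((a :: rest).map (fun w => w.drop 1))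
    else []
termination_by (ls.headD []).length
decreasing_by simp_all; cases a <;> simp_all

-- words[i:] for i ∈ range(n); List.drop i is exact for the non-negative i that range yields
def build_ngramms_alt (l : List String) (n : Int) : List (List String) :=
  l.foldl (fun ret terms =>
    let words := PySem.Str.split₀ terms
    if n ≤ (words.length : Int) then
      ret ++ pvZipStar ((List.range n.toNat).map (fun i => words.drop i))
    else ret) []

-- ===== PRECONDITION & SPEC =====
-- Pre_ excludes n ≤ 0 with a nonempty l: there A's while loop never terminates (len(terms) >= n stays true forever).
def Pre_build_ngramms (l : List String) (n : Int) : Prop := 1 ≤ n ∨ l = []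
instance (l : List String) (n : Int) : Decidable (Pre_build_ngramms l n) := by unfold Pre_build_ngramms; infer_instance
def pvWitness_build_ngramms : List String × Int := (["a b c d", "e f"], 2)

def Spec_build_ngramms (l : List String) (n : Int) (out : List (List String)) : Prop := out = build_ngramms_alt l n
instance (l : List String) (n : Int) (out : List (List String)) : Decidable (Spec_build_ngramms l n out) := by unfold Spec_build_ngramms; infer_instance

-- ===== CLAIM (what is proved, stated in full; the proofs are below) =====
def Claim_equal_build_ngramms : Prop := ∀ (l : List String) (n : Int), Dom_build_ngramms l n → Pre_build_ngramms l n → Spec_build_ngramms l n (build_ngramms l n)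

-- ===== LEMMAS AND PROOFS =====

theorem pvZipStar_of_nil_mem {ls : List (List String)} (h : [] ∈ ls) : pvZipStar ls = [] := by
  cases ls with
  | nil => simp at h
  | cons a rest =>
    rw [pvZipStar.eq_def]
    have : ¬ ((a :: rest).all (fun w => !w.isEmpty)) := by
      simp only [List.all_eq_true]
      intro hall
      have := hall _ h
      simp at this
    simp [this]

theorem pvZipStar_cons (a : List String) (rest : List (List String))
    (h : (a :: rest).all (fun w => !w.isEmpty) = true) :
    pvZipStar (a :: rest)
      = ((a :: rest).map (fun w => w.headD "")) :: pvZipStar ((a :: rest).map (fun w => w.drop 1)) := by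
  rw [pvZipStar.eq_def]
  simp [h]

theorem pv_take_eq_map_range : ∀ (xs : List String) (k : Nat), k ≤ xs.length →
    (List.range k).map (fun i => (xs.drop i).headD "") = xs.take k := by
  intro xs
  induction xs with
  | nil =>
    intro k hk
    have hk0 : k = 0 := by simpa using hk
    subst hk0
    simp
  | cons x t ih =>
    intro k hk
    cases k with
    | zero => simp
    | succ k' =>
      rw [List.range_succ_eq_map]
      simp only [List.map_cons, List.map_map, List.drop_zero, List.headD_cons]
      congr 1
      have := ih k' (by simpa using hk)
      simpa [Function.comp] using this

theorem pv_offsets_nil (words : List String) (n : Int) (hn : 1 ≤ n)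
    (h : ¬ n ≤ (words.length : Int)) :
    pvZipStar ((List.range n.toNat).map (fun i => words.drop i)) = [] := by
  apply pvZipStar_of_nil_mem
  simp only [List.mem_map, List.mem_range]
  refine ⟨n.toNat - 1, by omega, ?_⟩
  rw [List.drop_eq_nil_iff]
  simp at h ⊢; omega

theorem pvLoopA_eq (n : Int) (hn : 1 ≤ n) : ∀ (words : List String) (ret : List (List String)),
    pvLoopA ret words n = ret ++ pvZipStar ((List.range n.toNat).map (fun i => words.drop i)) := by
  intro words
  induction words with
  | nil =>
    intro ret
    rw [pvLoopA.eq_def]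
    have h2 : ([] : List String) ∈ (List.range n.toNat).map (fun i => ([] : List String).drop i) := by
      simp only [List.mem_map]
      exact ⟨0, by simp; omega, rfl⟩
    rw [pvZipStar_of_nil_mem h2]
    simp
  | cons w rest ih =>
    intro ret
    rw [pvLoopA.eq_def]
    by_cases hlen : n ≤ ((w :: rest).length : Int)
    · simp only [hlen, dite_true]
      rw [ih]
      -- analyse the RHS zipStar step
      have hk1 : 1 ≤ n.toNat := by omega
      have hklen : n.toNat ≤ (w :: rest).length := by
        simp at hlen ⊢; omega
      simp only [List.length_cons] at hklen
      obtain ⟨k', hk'⟩ : ∃ k', n.toNat = k' + 1 := ⟨n.toNat - 1, by omega⟩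
      have hcons : (List.range n.toNat).map (fun i => (w :: rest).drop i)
          = ((w :: rest).drop 0) :: (List.range k').map (fun i => (w :: rest).drop (i+1)) := by
        rw [hk', List.range_succ_eq_map]
        simp [List.map_map, Function.comp]
      have hall : (((w :: rest).drop 0) :: (List.range k').map (fun i => (w :: rest).drop (i+1))).all
          (fun w => !w.isEmpty) = true := by
        simp only [List.all_eq_true]
        intro x hx
        simp only [List.mem_cons, List.mem_map, List.mem_range] at hx
        rcases hx with h | ⟨i, hi, rfl⟩
        · subst h; simp
        · simp [List.drop_eq_nil_iff]
          omega
      rw [hcons, pvZipStar_cons _ _ hall, ← hcons]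
      have hheads : ((List.range n.toNat).map (fun i => (w :: rest).drop i)).map
          (fun t => t.headD "") = (w :: rest).take n.toNat := by
        rw [List.map_map]
        exact pv_take_eq_map_range (w :: rest) n.toNat (by simpa using hklen)
      have htails : ((List.range n.toNat).map (fun i => (w :: rest).drop i)).map
          (fun t => t.drop 1) = (List.range n.toNat).map (fun i => rest.drop i) := by
        rw [List.map_map]
        apply List.map_congr_left
        intro i _
        show ((w :: rest).drop i).drop 1 = rest.drop i
        rw [List.drop_drop]
        simp
      rw [hheads, htails]
      have hslice : PySem.List.slice (w :: rest) none (some n) = (w :: rest).take n.toNat :=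
        PySem.List.slice_to _ (by omega)
      simp [hslice, List.append_assoc]
    · simp only [hlen, dite_false]
      have hnil : ([] : List String) ∈ (List.range n.toNat).map (fun i => (w :: rest).drop i) := by
        simp only [List.mem_map, List.mem_range]
        refine ⟨n.toNat - 1, by omega, ?_⟩
        rw [List.drop_eq_nil_iff]
        simp at hlen ⊢; omega
      simp [pvZipStar_of_nil_mem hnil]

-- ===== VERDICT (by name: the statement is the Claim_ definition above) =====
theorem build_ngramms_spec : Claim_equal_build_ngramms := by
  intro l n _ hpre
  unfold Spec_build_ngramms build_ngramms build_ngramms_alt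
  rcases hpre with hn | rfl
  · apply PySem.List.foldl_congr_mem l _ _ []
    intro ret terms _
    by_cases h : n ≤ ((PySem.Str.split₀ terms).length : Int)
    · rw [pvLoopA_eq n hn]
      simp [h]
    · rw [pvLoopA_eq n hn, pv_offsets_nil _ n hn h]
      simp [h]
  · rfl
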